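-- pv_equiv track=rewrite | github.com/keyhan-azarjoo/Server-Installer | dashboard/ai_services.py | _openclaw_ollama_api_root
-- ===== SOURCE A (Python) =====
-- def _openclaw_ollama_api_root(url):
--     base = str(url or "").strip().rstrip("/")
--     if not base:
--         return ""
--     for suffix in ("/api/tags", "/api", "/v1"):
--         if base.endswith(suffix):
--             base = base[:-len(suffix)]
--             break
--     return base.rstrip("/")
-- ===== SOURCE B (Python) =====
-- def _openclaw_ollama_api_root(url):
--     base = str(url or "").strip().rstrip("/")
--     parts = base.split("/")
--     if len(parts) >= 3 and parts[-2:] == ["api", "tags"]: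
--         parts = parts[:-2]
--     elif len(parts) >= 2 and parts[-1] in ("api", "v1"):
--         parts = parts[:-1]
--     return "/".join(parts).rstrip("/")
-- ===== Notes on version B (the rewrite author's own statement) =====
-- stated objective: alternative
-- what changed: B replaces A's endswith-loop over literal suffix strings (with negative-index slicing) by splitting the URL into slash-separated segments and dropping the known trailing segments, then rejoining.
import Mathlib
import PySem

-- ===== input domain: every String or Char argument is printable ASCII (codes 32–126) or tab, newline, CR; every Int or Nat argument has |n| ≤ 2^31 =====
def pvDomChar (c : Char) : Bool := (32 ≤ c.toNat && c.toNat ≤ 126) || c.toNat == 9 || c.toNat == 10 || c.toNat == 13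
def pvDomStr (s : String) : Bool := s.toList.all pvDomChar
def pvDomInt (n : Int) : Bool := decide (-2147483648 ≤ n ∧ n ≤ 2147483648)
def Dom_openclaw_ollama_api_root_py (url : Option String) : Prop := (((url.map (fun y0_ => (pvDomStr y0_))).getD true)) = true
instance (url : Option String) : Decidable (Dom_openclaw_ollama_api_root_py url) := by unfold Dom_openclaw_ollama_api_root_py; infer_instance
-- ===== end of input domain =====

-- B replaces A's endswith-loop over suffix strings by splitting the URL into '/'-separated
-- segments and dropping the known trailing segments; objective: alternative.

-- hand port of str.rstrip("/") (PySem has no single-sided rstrip-with-chars):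
-- exact — removes exactly the maximal run of trailing '/' characters
def pyRstripSlash (cs : List Char) : List Char := (cs.reverse.dropWhile (· == '/')).reverse

-- ===== PORT A =====
def openclaw_ollama_api_root_py (url : Option String) : String :=
  let base := pyRstripSlash (PySem.Chars.strip (url.getD "").toList)
  if base = [] then ""
  else
    let base1 :=
      if PySem.Chars.endswith base "/api/tags".toList then PySem.List.slice base none (some (-9))
      else if PySem.Chars.endswith base "/api".toList then PySem.List.slice base none (some (-4))
      else if PySem.Chars.endswith base "/v1".toList then PySem.List.slice base none (some (-3))
      else base
    String.ofList (pyRstripSlash base1)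

-- ===== PORT B =====
def openclaw_ollama_api_root_py_alt (url : Option String) : String :=
  let base := pyRstripSlash (PySem.Chars.strip (url.getD "").toList)
  let parts := List.splitOn '/' base
  let parts1 :=
    if 3 ≤ parts.length ∧ PySem.List.slice parts (some (-2)) none = ["api".toList, "tags".toList] then
      PySem.List.slice parts none (some (-2))
    else if 2 ≤ parts.length ∧ (PySem.List.pyGet? parts (-1) = some "api".toList ∨ PySem.List.pyGet? parts (-1) = some "v1".toList) then
      PySem.List.slice parts none (some (-1))
    else parts
  String.ofList (pyRstripSlash (List.intercalate ['/'] parts1))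

-- ===== PRECONDITION & SPEC =====
def Spec_openclaw_ollama_api_root_py (url : Option String) (out : String) : Prop := out = openclaw_ollama_api_root_py_alt url
instance (url : Option String) (out : String) : Decidable (Spec_openclaw_ollama_api_root_py url out) := by unfold Spec_openclaw_ollama_api_root_py; infer_instance

-- ===== CLAIM (what is proved, stated in full; the proofs are below) =====
def Claim_equal_openclaw_ollama_api_root_py : Prop := ∀ (url : Option String), Dom_openclaw_ollama_api_root_py url → Spec_openclaw_ollama_api_root_py url (openclaw_ollama_api_root_py url)

-- ===== LEMMAS AND PROOFS =====

theorem splitOn_slash_ne_nil (a : List Char) : List.splitOn '/' a ≠ [] := by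
  unfold List.splitOn; exact List.splitOnP_ne_nil _ _

theorem splitOn_slash_append (a b : List Char) :
    List.splitOn '/' (a ++ '/' :: b) = List.splitOn '/' a ++ List.splitOn '/' b := by
  induction a with
  | nil => simp [List.splitOn, List.splitOnP_cons, List.splitOnP_nil]
  | cons c a ih =>
    by_cases hc : c = '/'
    · subst hc; simp [List.splitOn, List.splitOnP_cons] at ih ⊢; simp [ih]
    · simp [List.splitOn, List.splitOnP_cons, hc] at ih ⊢
      rw [ih]
      rcases h : List.splitOnP (fun x => x == '/') a with _ | ⟨p, ps⟩
      · exact absurd h (List.splitOnP_ne_nil _ a)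
      · simp

theorem splitOn_slash_no_sep (a : List Char) (h : '/' ∉ a) : List.splitOn '/' a = [a] := by
  induction a with
  | nil => simp [List.splitOn, List.splitOnP_nil]
  | cons c a ih =>
    simp at h
    simp [List.splitOn, List.splitOnP_cons, Ne.symm h.1] at ih ⊢
    simp [ih h.2]

theorem intercalate_slash_snoc (ps : List (List Char)) (w : List Char) (h : ps ≠ []) :
    List.intercalate ['/'] (ps ++ [w]) = List.intercalate ['/'] ps ++ '/' :: w := by
  induction ps with
  | nil => exact absurd rfl h
  | cons p ps ih =>
    rcases ps with _ | ⟨q, qs⟩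
    · simp [List.intercalate]
    · have := ih (by simp)
      simp [List.intercalate] at this ⊢
      simp [this]

-- split of a string ending in "/<w>" for slash-free w
theorem splitOn_slash_snoc_seg (a w : List Char) (hw : '/' ∉ w) :
    List.splitOn '/' (a ++ '/' :: w) = List.splitOn '/' a ++ [w] := by
  rw [splitOn_slash_append, splitOn_slash_no_sep w hw]

theorem last_iff (cs w : List Char) (hw : '/' ∉ w) :
    (2 ≤ (List.splitOn '/' cs).length ∧ (List.splitOn '/' cs).getLast? = some w)
      ↔ ('/' :: w) <:+ cs := by
  constructor
  · rintro ⟨hlen, hlast⟩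
    have hne : List.splitOn '/' cs ≠ [] := splitOn_slash_ne_nil cs
    have hdecomp : List.splitOn '/' cs = (List.splitOn '/' cs).dropLast ++ [w] := by
      conv_lhs => rw [← List.dropLast_append_getLast hne]
      rw [List.getLast_eq_iff_getLast?_eq_some hne |>.mpr hlast]
    have hps : (List.splitOn '/' cs).dropLast ≠ [] := by
      intro h
      have hl := congrArg List.length hdecomp
      rw [h] at hl; simp at hl; omega
    have hcs : cs = List.intercalate ['/'] ((List.splitOn '/' cs).dropLast ++ [w]) := by
      conv_lhs => rw [← List.intercalate_splitOn cs '/']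
      rw [← hdecomp]
    rw [intercalate_slash_snoc _ _ hps] at hcs
    exact ⟨_, hcs.symm⟩
  · rintro ⟨a, ha⟩
    subst ha
    rw [splitOn_slash_snoc_seg a w hw]
    constructor
    · have := List.length_pos_iff.mpr (splitOn_slash_ne_nil a)
      simp; omega
    · simp

theorem pair_iff (cs : List Char) :
    (3 ≤ (List.splitOn '/' cs).length ∧
      (List.splitOn '/' cs).drop ((List.splitOn '/' cs).length - 2) = ["api".toList, "tags".toList])
      ↔ "/api/tags".toList <:+ cs := by
  constructor
  · rintro ⟨hlen, hdrop⟩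
    set ps := (List.splitOn '/' cs).take ((List.splitOn '/' cs).length - 2) with hps_def
    have hdecomp : List.splitOn '/' cs = ps ++ ["api".toList, "tags".toList] := by
      conv_lhs => rw [← List.take_append_drop ((List.splitOn '/' cs).length - 2) (List.splitOn '/' cs)]
      rw [hdrop]
    have htk : ps ≠ [] := by
      intro h
      have hl := congrArg List.length hdecomp
      rw [h] at hl; simp at hl; omega
    have hcs : cs = List.intercalate ['/'] (ps ++ ["api".toList, "tags".toList]) := by
      conv_lhs => rw [← List.intercalate_splitOn cs '/']
      rw [← hdecomp]
    have hsplit2 : ps ++ (["api".toList, "tags".toList] : List (List Char))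
        = (ps ++ ["api".toList]) ++ ["tags".toList] := by simp
    rw [hsplit2, intercalate_slash_snoc _ _ (by simp), intercalate_slash_snoc _ _ htk] at hcs
    refine ⟨List.intercalate ['/'] ps, ?_⟩
    rw [hcs, List.append_assoc]
    rfl
  · rintro ⟨a, ha⟩
    have hsfx : "/api/tags".toList = '/' :: ("api".toList ++ '/' :: "tags".toList) := rfl
    rw [hsfx] at ha
    subst ha
    rw [splitOn_slash_append, splitOn_slash_append,
        splitOn_slash_no_sep "api".toList (by decide), splitOn_slash_no_sep "tags".toList (by decide)]
    have h1 := List.length_pos_iff.mpr (splitOn_slash_ne_nil a)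
    constructor
    · simp; omega
    · exact List.drop_left' (by simp)

theorem slice_none_neg {α : Type} (xs : List α) (k : Nat) (hk0 : 0 < k) (hk : k ≤ xs.length) :
    PySem.List.slice xs none (some (-(k : Int))) = xs.take (xs.length - k) := by
  simp [PySem.List.slice, PySem.List.clampIdx]
  split_ifs <;> omega

theorem slice_neg_two {α : Type} (xs : List α) :
    PySem.List.slice xs (some (-2)) none = xs.drop (xs.length - 2) := by
  simp [PySem.List.slice, PySem.List.clampIdx]
  have h2 : (if xs.length ≤ 1 then 0 else ((xs.length : Int) + -2).toNat) = xs.length - 2 := by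
    split_ifs <;> omega
  rw [h2, List.take_of_length_le (by simp)]

theorem pyGet_neg_one {α : Type} (xs : List α) : PySem.List.pyGet? xs (-1) = xs.getLast? := by
  rcases xs with _ | ⟨x, l⟩
  · simp [PySem.List.pyGet?, PySem.List.pyIdx?]
  · simp [PySem.List.pyGet?, PySem.List.pyIdx?, List.getLast?_eq_getElem?]

theorem slash_splitOn_pos (a : List Char) : 1 ≤ (List.splitOn '/' a).length :=
  List.length_pos_iff.mpr (splitOn_slash_ne_nil a)

-- generic output agreement for a single dropped slash-free segment w
theorem out_single (a w : List Char) (hw : '/' ∉ w) :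
    List.intercalate ['/'] (PySem.List.slice (List.splitOn '/' (a ++ '/' :: w)) none (some (-1))) = a := by
  have h1 := slash_splitOn_pos a
  rw [splitOn_slash_snoc_seg a w hw]
  have := slice_none_neg (List.splitOn '/' a ++ [w]) 1 (by omega) (by simp)
  simp only [Nat.cast_one] at this
  rw [this]
  have hl : (List.splitOn '/' a ++ [w]).length - 1 = (List.splitOn '/' a).length := by simp
  rw [hl, List.take_left]
  exact List.intercalate_splitOn a '/'

theorem out_pair (a : List Char) :
    List.intercalate ['/'] (PySem.List.slice (List.splitOn '/' (a ++ "/api/tags".toList)) none (some (-2))) = a := by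
  have h1 := slash_splitOn_pos a
  have hsfx : a ++ "/api/tags".toList = a ++ '/' :: ("api".toList ++ '/' :: "tags".toList) := rfl
  rw [hsfx, splitOn_slash_append, splitOn_slash_append,
      splitOn_slash_no_sep "api".toList (by decide), splitOn_slash_no_sep "tags".toList (by decide)]
  have := slice_none_neg (List.splitOn '/' a ++ (["api".toList] ++ ["tags".toList])) 2 (by omega) (by simp)
  simp only [Nat.cast_ofNat] at this
  rw [this]
  have hl : (List.splitOn '/' a ++ (["api".toList] ++ ["tags".toList])).length - 2 = (List.splitOn '/' a).length := by simp
  rw [hl, List.take_left]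
  exact List.intercalate_splitOn a '/'

theorem cut_single (a w : List Char) (k : Nat) (hk : k = w.length + 1) (h0 : 0 < k) :
    PySem.List.slice (a ++ '/' :: w) none (some (-(k : Int))) = a := by
  have := slice_none_neg (a ++ '/' :: w) k h0 (by simp; omega)
  rw [this]
  have hl : (a ++ '/' :: w).length - k = a.length := by simp; omega
  rw [hl, List.take_left]

theorem openclaw_core (cs : List Char) :
    (if PySem.Chars.endswith cs "/api/tags".toList then PySem.List.slice cs none (some (-9))
     else if PySem.Chars.endswith cs "/api".toList then PySem.List.slice cs none (some (-4))
     else if PySem.Chars.endswith cs "/v1".toList then PySem.List.slice cs none (some (-3))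
     else cs) =
    (let parts := List.splitOn '/' cs
     List.intercalate ['/']
      (if 3 ≤ parts.length ∧ PySem.List.slice parts (some (-2)) none = ["api".toList, "tags".toList] then
        PySem.List.slice parts none (some (-2))
      else if 2 ≤ parts.length ∧ (PySem.List.pyGet? parts (-1) = some "api".toList ∨ PySem.List.pyGet? parts (-1) = some "v1".toList) then
        PySem.List.slice parts none (some (-1))
      else parts)) := by
  simp only [slice_neg_two, pyGet_neg_one]
  by_cases hpair : "/api/tags".toList <:+ cs
  · have hA : PySem.Chars.endswith cs "/api/tags".toList = true :=
      (PySem.Chars.endswith_iff cs "/api/tags".toList).mpr hpair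
    have hB := (pair_iff cs).mpr hpair
    rw [if_pos hA, if_pos hB]
    obtain ⟨a, ha⟩ := hpair
    subst ha
    show PySem.List.slice (a ++ '/' :: "api/tags".toList) none (some (-((9 : Nat) : Int)))
        = List.intercalate ['/'] (PySem.List.slice (List.splitOn '/' (a ++ "/api/tags".toList)) none (some (-2)))
    rw [cut_single a ("api/tags".toList) 9 (by decide) (by decide)]
    exact (out_pair a).symm
  · have hA1 : ¬ (PySem.Chars.endswith cs "/api/tags".toList = true) :=
      fun h => hpair ((PySem.Chars.endswith_iff cs "/api/tags".toList).mp h)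
    have hB1 : ¬ (3 ≤ (List.splitOn '/' cs).length ∧
        (List.splitOn '/' cs).drop ((List.splitOn '/' cs).length - 2) = ["api".toList, "tags".toList]) :=
      fun h => hpair ((pair_iff cs).mp h)
    rw [if_neg hA1, if_neg hB1]
    by_cases hapi : "/api".toList <:+ cs
    · have hA2 : PySem.Chars.endswith cs "/api".toList = true :=
        (PySem.Chars.endswith_iff cs "/api".toList).mpr hapi
      have hlast := (last_iff cs "api".toList (by decide)).mpr hapi
      rw [if_pos hA2, if_pos ⟨hlast.1, Or.inl hlast.2⟩]
      obtain ⟨a, ha⟩ := hapi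
      subst ha
      show PySem.List.slice (a ++ '/' :: "api".toList) none (some (-((4 : Nat) : Int)))
          = List.intercalate ['/'] (PySem.List.slice (List.splitOn '/' (a ++ '/' :: "api".toList)) none (some (-1)))
      rw [cut_single a ("api".toList) 4 (by decide) (by decide)]
      exact (out_single a "api".toList (by decide)).symm
    · have hA2 : ¬ (PySem.Chars.endswith cs "/api".toList = true) :=
        fun h => hapi ((PySem.Chars.endswith_iff cs "/api".toList).mp h)
      rw [if_neg hA2]
      by_cases hv1 : "/v1".toList <:+ cs
      · have hA3 : PySem.Chars.endswith cs "/v1".toList = true :=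
          (PySem.Chars.endswith_iff cs "/v1".toList).mpr hv1
        have hlast := (last_iff cs "v1".toList (by decide)).mpr hv1
        rw [if_pos hA3, if_pos ⟨hlast.1, Or.inr hlast.2⟩]
        obtain ⟨a, ha⟩ := hv1
        subst ha
        show PySem.List.slice (a ++ '/' :: "v1".toList) none (some (-((3 : Nat) : Int)))
            = List.intercalate ['/'] (PySem.List.slice (List.splitOn '/' (a ++ '/' :: "v1".toList)) none (some (-1)))
        rw [cut_single a ("v1".toList) 3 (by decide) (by decide)]
        exact (out_single a "v1".toList (by decide)).symm
      · have hA3 : ¬ (PySem.Chars.endswith cs "/v1".toList = true) :=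
          fun h => hv1 ((PySem.Chars.endswith_iff cs "/v1".toList).mp h)
        have hB2 : ¬ (2 ≤ (List.splitOn '/' cs).length ∧
            ((List.splitOn '/' cs).getLast? = some "api".toList ∨ (List.splitOn '/' cs).getLast? = some "v1".toList)) := by
          rintro ⟨hn, h | h⟩
          · exact hapi ((last_iff cs "api".toList (by decide)).mp ⟨hn, h⟩)
          · exact hv1 ((last_iff cs "v1".toList (by decide)).mp ⟨hn, h⟩)
        rw [if_neg hA3, if_neg hB2]
        exact (List.intercalate_splitOn cs '/').symm

theorem main_eq (b : List Char) :
    (if b = [] then "" else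
      String.ofList (pyRstripSlash
        (if PySem.Chars.endswith b "/api/tags".toList then PySem.List.slice b none (some (-9))
         else if PySem.Chars.endswith b "/api".toList then PySem.List.slice b none (some (-4))
         else if PySem.Chars.endswith b "/v1".toList then PySem.List.slice b none (some (-3))
         else b)))
    = String.ofList (pyRstripSlash (List.intercalate ['/']
        (let parts := List.splitOn '/' b
         if 3 ≤ parts.length ∧ PySem.List.slice parts (some (-2)) none = ["api".toList, "tags".toList] then
           PySem.List.slice parts none (some (-2))
         else if 2 ≤ parts.length ∧ (PySem.List.pyGet? parts (-1) = some "api".toList ∨ PySem.List.pyGet? parts (-1) = some "v1".toList) then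
           PySem.List.slice parts none (some (-1))
         else parts))) := by
  by_cases hb : b = []
  · subst hb; rfl
  · rw [if_neg hb]
    have h := openclaw_core b
    simp only at h
    rw [h]

-- ===== VERDICT (by name: the statement is the Claim_ definition above) =====
theorem openclaw_ollama_api_root_py_spec : Claim_equal_openclaw_ollama_api_root_py := by
  intro url _
  show openclaw_ollama_api_root_py url = openclaw_ollama_api_root_py_alt url
  unfold openclaw_ollama_api_root_py openclaw_ollama_api_root_py_alt
  exact main_eq (pyRstripSlash (PySem.Chars.strip ((url.getD "").toList)))
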